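-- pv_equiv track=rewrite | github.com/rmsk2/rmsk2 | pyrmsk2/rotorsim.py | group_text
-- ===== SOURCE A (Python) =====
-- def group_text(text_in, uppercase = False, group_size = 5, groups_per_line = 10):
--     result = ''
--     current_groups = []
--     current_group = ' '
--
--     for i in text_in:
--         if uppercase:
--             i = i.upper()
--         else:
--             i = i.lower()
--
--         current_group = current_group + i
--
--         if len(current_group) == (group_size + 1):
--             current_groups.append(current_group)
--             current_group = ' '
--
--             if len(current_groups) == groups_per_line:
--                 result = result + '\n' + (''.join(current_groups)).strip()
--                 current_groups = []
--
--     last_line = (''.join(current_groups) + current_group).strip()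
--
--     if last_line != '':
--         result = result + '\n' + last_line
--
--     result = result.strip()
--
--     return result
-- ===== SOURCE B (Python) =====
-- def group_text(text_in, uppercase = False, group_size = 5, groups_per_line = 10):
--     text = text_in.upper() if uppercase else text_in.lower()
--
--     chunks = []
--     if group_size <= 0:
--         chunks = [text]
--     else:
--         while text:
--             chunks.append(text[:group_size])
--             text = text[group_size:]
--
--     batches = []
--     if groups_per_line <= 0:
--         batches = [chunks]
--     else:
--         while chunks:
--             batches.append(chunks[:groups_per_line])
--             chunks = chunks[groups_per_line:]
--
--     return '\n'.join(' '.join(b).strip() for b in batches).strip()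
-- ===== Notes on version B (the rewrite author's own statement) =====
-- stated objective: faster
-- what changed: B replaces A's per-character Python loop (space-sentinel accumulation with inline line flushing) by whole-string case conversion and slice-based chunking into groups and batches with space/newline joins plus strips.
import Mathlib
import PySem

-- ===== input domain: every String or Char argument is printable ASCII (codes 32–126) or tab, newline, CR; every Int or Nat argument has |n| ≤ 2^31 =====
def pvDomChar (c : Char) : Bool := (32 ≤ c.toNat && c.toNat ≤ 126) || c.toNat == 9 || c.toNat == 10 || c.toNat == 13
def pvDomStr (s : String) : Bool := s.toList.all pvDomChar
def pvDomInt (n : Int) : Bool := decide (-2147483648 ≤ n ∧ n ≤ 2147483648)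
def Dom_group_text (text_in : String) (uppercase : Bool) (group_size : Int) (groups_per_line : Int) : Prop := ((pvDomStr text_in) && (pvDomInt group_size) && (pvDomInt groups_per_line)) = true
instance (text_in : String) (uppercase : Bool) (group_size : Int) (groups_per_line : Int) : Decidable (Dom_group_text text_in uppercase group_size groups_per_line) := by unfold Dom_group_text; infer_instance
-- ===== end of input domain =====

-- B groups the text by slicing whole chunks instead of A's per-character accumulation; return values proved equal.

-- ===== PORT A =====
-- one loop step of A: case-convert the char, extend current_group, flush a full group / full line
def grpStepA (uppercase : Bool) (group_size groups_per_line : Int)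
    (st : List Char × List (List Char) × List Char) (ch : Char) :
    List Char × List (List Char) × List Char :=
  let i := if uppercase then PySem.Chars.upperChar ch else PySem.Chars.lowerChar ch
  let cur := st.2.2 ++ [i]
  if (cur.length : Int) = group_size + 1 then
    let grps := st.2.1 ++ [cur]
    if (grps.length : Int) = groups_per_line then
      (st.1 ++ '\n' :: PySem.Chars.strip (PySem.Chars.join [] grps), [], [' '])
    else (st.1, grps, [' '])
  else (st.1, st.2.1, cur)

def group_text (text_in : String) (uppercase : Bool) (group_size : Int) (groups_per_line : Int) : String :=
  let st := text_in.toList.foldl (grpStepA uppercase group_size groups_per_line) ([], [], [' '])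
  let last_line := PySem.Chars.strip (PySem.Chars.join [] st.2.1 ++ st.2.2)
  let res := if last_line ≠ [] then st.1 ++ '\n' :: last_line else st.1
  String.ofList (PySem.Chars.strip res)

-- ===== PORT B =====
-- B's while loop 'chunks.append(text[:k+1]); text = text[k+1:]' (slices of a positive
-- length are take/drop: PySem.List.slice_to / slice_from); called with k = size - 1 ≥ 0
def chunkBy {α : Type} (k : Nat) : List α → List (List α)
  | [] => []
  | x :: xs => ((x :: xs).take (k + 1)) :: chunkBy k ((x :: xs).drop (k + 1))
termination_by t => t.length
decreasing_by simp

def group_text_alt (text_in : String) (uppercase : Bool) (group_size : Int) (groups_per_line : Int) : String :=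
  let t := if uppercase then PySem.Chars.upper text_in.toList else PySem.Chars.lower text_in.toList
  let chunks := if group_size ≤ 0 then [t] else chunkBy (group_size.toNat - 1) t
  let batches := if groups_per_line ≤ 0 then [chunks] else chunkBy (groups_per_line.toNat - 1) chunks
  String.ofList (PySem.Chars.strip (PySem.Chars.join ['\n']
    (batches.map (fun b => PySem.Chars.strip (PySem.Chars.join [' '] b)))))

-- ===== PRECONDITION & SPEC =====
def Spec_group_text (text_in : String) (uppercase : Bool) (group_size : Int) (groups_per_line : Int) (out : String) : Prop := out = group_text_alt text_in uppercase group_size groups_per_line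
instance (text_in : String) (uppercase : Bool) (group_size : Int) (groups_per_line : Int) (out : String) : Decidable (Spec_group_text text_in uppercase group_size groups_per_line out) := by unfold Spec_group_text; infer_instance

-- ===== CLAIM (what is proved, stated in full; the proofs are below) =====
def Claim_equal_group_text : Prop := ∀ (text_in : String) (uppercase : Bool) (group_size : Int) (groups_per_line : Int), Dom_group_text text_in uppercase group_size groups_per_line → Spec_group_text text_in uppercase group_size groups_per_line (group_text text_in uppercase group_size groups_per_line)

-- ===== LEMMAS AND PROOFS =====

-- A's step with the case conversion factored out
def stepA (group_size groups_per_line : Int)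
    (st : List Char × List (List Char) × List Char) (i : Char) :
    List Char × List (List Char) × List Char :=
  let cur := st.2.2 ++ [i]
  if (cur.length : Int) = group_size + 1 then
    let grps := st.2.1 ++ [cur]
    if (grps.length : Int) = groups_per_line then
      (st.1 ++ '\n' :: PySem.Chars.strip (PySem.Chars.join [] grps), [], [' '])
    else (st.1, grps, [' '])
  else (st.1, st.2.1, cur)

theorem grpStepA_eq (u : Bool) (g p : Int) :
    grpStepA u g p = fun st ch => stepA g p st (if u then PySem.Chars.upperChar ch else PySem.Chars.lowerChar ch) := rfl

-- A's loop at chunk granularity: one full group arrives, maybe flushing a line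
def cStep (p : Int) (st : List Char × List (List Char)) (c : List Char) :
    List Char × List (List Char) :=
  if (st.2.length : Int) + 1 = p then
    (st.1 ++ '\n' :: PySem.Chars.strip (PySem.Chars.join [] (st.2 ++ [' ' :: c])), [])
  else (st.1, st.2 ++ [' ' :: c])

-- the complete leading blocks of size k+1, and the (short, possibly empty) remainder
def fullTake {α : Type} (k : Nat) (t : List α) : List (List α) :=
  if t.length < k + 1 then [] else t.take (k + 1) :: fullTake k (t.drop (k + 1))
termination_by t.length
decreasing_by simp; omega

def partTake {α : Type} (k : Nat) (t : List α) : List α :=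
  if t.length < k + 1 then t else partTake k (t.drop (k + 1))
termination_by t.length
decreasing_by simp; omega

theorem fullTake_small {α : Type} (k : Nat) (t : List α) (h : t.length < k + 1) :
    fullTake k t = [] := by rw [fullTake]; simp [h]

theorem partTake_small {α : Type} (k : Nat) (t : List α) (h : t.length < k + 1) :
    partTake k t = t := by rw [partTake]; simp [h]

theorem length_partTake {α : Type} (k : Nat) (t : List α) : (partTake k t).length < k + 1 := by
  induction t using partTake.induct k with
  | case1 t h => rw [partTake_small k t h]; exact h
  | case2 t h ih => rw [partTake]; simp only [if_neg h]; exact ih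

theorem fullTake_block {α : Type} (k : Nat) (b r : List α) (hb : b.length = k + 1) :
    fullTake k (b ++ r) = b :: fullTake k r := by
  rw [fullTake]
  have hlen : (b ++ r).length = k + 1 + r.length := by simp [hb]
  rw [if_neg (by omega)]
  rw [List.take_left' hb, List.drop_left' hb]

theorem partTake_block {α : Type} (k : Nat) (b r : List α) (hb : b.length = k + 1) :
    partTake k (b ++ r) = partTake k r := by
  rw [partTake]
  have hlen : (b ++ r).length = k + 1 + r.length := by simp [hb]
  rw [if_neg (by omega)]
  rw [List.drop_left' hb]

-- chunkBy = the full blocks plus the nonempty remainder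
theorem chunkBy_eq_fullTake_partTake {α : Type} (k : Nat) (t : List α) :
    chunkBy k t = fullTake k t ++ (if partTake k t = [] then [] else [partTake k t]) := by
  induction t using chunkBy.induct k with
  | case1 => simp [chunkBy, fullTake_small k [] (by simp), partTake_small k [] (by simp)]
  | case2 x xs ih =>
    by_cases h : (x :: xs).length < k + 1
    · have htake : (x :: xs).take (k + 1) = x :: xs := List.take_of_length_le (by omega)
      have hdrop : (x :: xs).drop (k + 1) = [] := List.drop_of_length_le (by omega)
      rw [chunkBy, htake, hdrop, fullTake_small k _ h, partTake_small k _ h]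
      simp [chunkBy]
    · have hsplit : (x :: xs) = (x :: xs).take (k + 1) ++ (x :: xs).drop (k + 1) :=
        (List.take_append_drop _ _).symm
      have hlen : ((x :: xs).take (k + 1)).length = k + 1 := by
        rw [List.length_take]; omega
      rw [chunkBy]
      conv_rhs => rw [hsplit]
      rw [fullTake_block k _ _ hlen, partTake_block k _ _ hlen, ih]
      simp

-- appending a short tail r to t: either it stays inside the last partial block …
theorem fullTake_append_small {α : Type} (k : Nat) (t r : List α)
    (h : (partTake k t).length + r.length < k + 1) :
    fullTake k (t ++ r) = fullTake k t ∧ partTake k (t ++ r) = partTake k t ++ r := by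
  induction t using partTake.induct k with
  | case1 t ht =>
    rw [partTake_small k t ht] at h
    have hlr : (t ++ r).length < k + 1 := by simp; omega
    rw [partTake_small k t ht, fullTake_small k t ht,
        fullTake_small k _ hlr, partTake_small k _ hlr]
    exact ⟨rfl, rfl⟩
  | case2 t ht ih =>
    have hlen : ((t).take (k + 1)).length = k + 1 := by rw [List.length_take]; omega
    have hsplit : t ++ r = t.take (k + 1) ++ (t.drop (k + 1) ++ r) := by
      rw [← List.append_assoc, List.take_append_drop]
    have hpt : partTake k t = partTake k (t.drop (k + 1)) := by
      rw [partTake, if_neg ht]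
    have hft : fullTake k t = t.take (k + 1) :: fullTake k (t.drop (k + 1)) := by
      rw [fullTake, if_neg ht]
    rw [hpt] at h
    obtain ⟨h1, h2⟩ := ih h
    constructor
    · rw [hsplit, fullTake_block k _ _ hlen, h1, hft]
    · rw [hsplit, partTake_block k _ _ hlen, h2, hpt]

-- … or it completes exactly one more block
theorem fullTake_append_full {α : Type} (k : Nat) (t r : List α)
    (h : (partTake k t).length + r.length = k + 1) :
    fullTake k (t ++ r) = fullTake k t ++ [partTake k t ++ r] ∧ partTake k (t ++ r) = [] := by
  induction t using partTake.induct k with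
  | case1 t ht =>
    rw [partTake_small k t ht] at h
    rw [partTake_small k t ht, fullTake_small k t ht]
    have hlen : (t ++ r).length = k + 1 := by simp; omega
    constructor
    · rw [fullTake, if_neg (by omega), List.take_of_length_le (by omega),
          List.drop_of_length_le (by omega), fullTake_small k [] (by simp)]
      simp
    · rw [partTake, if_neg (by omega), List.drop_of_length_le (by omega),
          partTake_small k [] (by simp)]
  | case2 t ht ih =>
    have hlen : ((t).take (k + 1)).length = k + 1 := by rw [List.length_take]; omega
    have hsplit : t ++ r = t.take (k + 1) ++ (t.drop (k + 1) ++ r) := by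
      rw [← List.append_assoc, List.take_append_drop]
    have hpt : partTake k t = partTake k (t.drop (k + 1)) := by
      rw [partTake, if_neg ht]
    have hft : fullTake k t = t.take (k + 1) :: fullTake k (t.drop (k + 1)) := by
      rw [fullTake, if_neg ht]
    rw [hpt] at h
    obtain ⟨h1, h2⟩ := ih h
    constructor
    · rw [hsplit, fullTake_block k _ _ hlen, h1, hpt, hft]
      simp
    · rw [hsplit, partTake_block k _ _ hlen, h2]

-- c-prefixed pieces, concatenated, are the [c]-joined pieces after one leading c
theorem flatten_map_cons (c : Char) (x : List Char) (xs : List (List Char)) :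
    (((x :: xs).map (fun l => c :: l)).flatten) = c :: PySem.Chars.join [c] (x :: xs) := by
  induction xs generalizing x with
  | nil => simp [PySem.Chars.join_singleton]
  | cons y ys ih =>
    rw [PySem.Chars.join_cons_cons]
    simp only [List.map_cons, List.flatten_cons] at *
    rw [ih y]
    simp

theorem join_nil_eq_flatten (l : List (List Char)) :
    PySem.Chars.join [] l = l.flatten := by
  induction l with
  | nil => simp [PySem.Chars.join_nil]
  | cons x t ih =>
    cases t with
    | nil => simp [PySem.Chars.join_singleton]
    | cons y ys => rw [PySem.Chars.join_cons_cons, ih]; simp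

-- strip laws
theorem strip_cons_space (c : Char) (h : PySem.Chars.isspace c = true) (x : List Char) :
    PySem.Chars.strip (c :: x) = PySem.Chars.strip x := by
  simp [PySem.Chars.strip, PySem.Chars.lstrip, List.dropWhile_cons_of_pos h]

theorem rstrip_append_space (c : Char) (h : PySem.Chars.isspace c = true) (x : List Char) :
    PySem.Chars.rstrip (x ++ [c]) = PySem.Chars.rstrip x := by
  simp [PySem.Chars.rstrip, List.dropWhile_cons_of_pos h]

theorem strip_append_space (c : Char) (h : PySem.Chars.isspace c = true) (x : List Char) :
    PySem.Chars.strip (x ++ [c]) = PySem.Chars.strip x := by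
  simp only [PySem.Chars.strip, PySem.Chars.lstrip, List.dropWhile_append]
  by_cases he : (x.dropWhile PySem.Chars.isspace).isEmpty
  · rw [if_pos he]
    rw [List.isEmpty_iff] at he
    rw [he]
    simp [List.dropWhile_cons_of_pos h, PySem.Chars.rstrip]
  · rw [if_neg he]
    exact rstrip_append_space c h _

theorem rstrip_prefix (y : List Char) : PySem.Chars.rstrip y <+: y := by
  have := List.dropWhile_suffix (l := y.reverse) PySem.Chars.isspace
  rw [PySem.Chars.rstrip]
  have h2 : (y.reverse.dropWhile PySem.Chars.isspace).reverse <+: y.reverse.reverse :=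
    List.reverse_prefix.mpr this
  simpa using h2

theorem rstrip_rstrip (y : List Char) :
    PySem.Chars.rstrip (PySem.Chars.rstrip y) = PySem.Chars.rstrip y := by
  simp [PySem.Chars.rstrip, List.dropWhile_idempotent]

theorem strip_strip (x : List Char) :
    PySem.Chars.strip (PySem.Chars.strip x) = PySem.Chars.strip x := by
  simp only [PySem.Chars.strip]
  have hl : PySem.Chars.lstrip (PySem.Chars.rstrip (PySem.Chars.lstrip x)) =
      PySem.Chars.rstrip (PySem.Chars.lstrip x) := by
    cases hz : PySem.Chars.rstrip (PySem.Chars.lstrip x) with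
    | nil => simp [PySem.Chars.lstrip]
    | cons a z =>
      have hpre : PySem.Chars.rstrip (PySem.Chars.lstrip x) <+: PySem.Chars.lstrip x :=
        rstrip_prefix _
      rw [hz] at hpre
      obtain ⟨tl, htl⟩ := hpre
      have hyw : x.dropWhile PySem.Chars.isspace = a :: (z ++ tl) := by
        rw [PySem.Chars.lstrip] at htl
        rw [← htl]
        simp
      have hne : x.dropWhile PySem.Chars.isspace ≠ [] := by simp [hyw]
      have hh := List.head_dropWhile_not PySem.Chars.isspace hne
      simp only [hyw, List.head_cons] at hh
      rw [PySem.Chars.lstrip, List.dropWhile_cons_of_neg (by simp [hh])]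
  rw [hl, rstrip_rstrip]

-- joining with [] the ' '-prefixed groups, then stripping = stripping the ' '-join
theorem strip_join_sp (l : List (List Char)) :
    PySem.Chars.strip (PySem.Chars.join [] (l.map (fun c => ' ' :: c))) =
      PySem.Chars.strip (PySem.Chars.join [' '] l) := by
  cases l with
  | nil => simp [PySem.Chars.join_nil]
  | cons x xs =>
    rw [join_nil_eq_flatten, flatten_map_cons ' ' x xs, strip_cons_space ' ' rfl]

-- the accumulated last line of A, as a stripped ' '-join
theorem lastline_eq (gs : List (List Char)) (part : List Char) :
    PySem.Chars.strip (PySem.Chars.join [] (gs.map (fun c => ' ' :: c)) ++ ' ' :: part) =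
      PySem.Chars.strip (PySem.Chars.join [' '] (gs ++ [part])) := by
  rw [← strip_join_sp (gs ++ [part])]
  congr 1
  rw [join_nil_eq_flatten, join_nil_eq_flatten]
  simp

-- a '\n'-prefixed concatenation strips like the '\n'-join
theorem strip_flatten_nl (L : List (List Char)) :
    PySem.Chars.strip ((L.map (fun l => '\n' :: l)).flatten) =
      PySem.Chars.strip (PySem.Chars.join ['\n'] L) := by
  cases L with
  | nil => simp [PySem.Chars.join_nil]
  | cons x xs => rw [flatten_map_cons '\n' x xs, strip_cons_space '\n' rfl]

theorem join_append_nil (c : Char) (x : List Char) (t : List (List Char)) :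
    PySem.Chars.join [c] ((x :: t) ++ [[]]) = PySem.Chars.join [c] (x :: t) ++ [c] := by
  induction t generalizing x with
  | nil =>
    rw [List.cons_append, List.nil_append, PySem.Chars.join_cons_cons,
        PySem.Chars.join_singleton, PySem.Chars.join_singleton]
    simp
  | cons y ys ih =>
    have e1 : (x :: (y :: ys)) ++ [[]] = x :: y :: (ys ++ [[]]) := by simp
    have e2 : y :: (ys ++ [[]]) = (y :: ys) ++ [[]] := by simp
    rw [e1, PySem.Chars.join_cons_cons, e2, ih y, PySem.Chars.join_cons_cons]
    simp

-- a trailing empty piece disappears under the final strip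
theorem strip_join_append_nil (c : Char) (h : PySem.Chars.isspace c = true)
    (l : List (List Char)) :
    PySem.Chars.strip (PySem.Chars.join [c] (l ++ [[]])) =
      PySem.Chars.strip (PySem.Chars.join [c] l) := by
  cases l with
  | nil => simp [PySem.Chars.join_singleton, PySem.Chars.join_nil]
  | cons x t => rw [join_append_nil c x t, strip_append_space c h]

-- ---- char-level lemmas ----

-- non-positive group size: the group-completion test never fires
theorem foldA_nonpos (g p : Int) (hg : g ≤ 0)
    (t : List Char) (res : List Char) (grps : List (List Char)) (c : List Char) :
    t.foldl (stepA g p) (res, grps, ' ' :: c) = (res, grps, ' ' :: (c ++ t)) := by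
  induction t generalizing c with
  | nil => simp
  | cons ch t' ih =>
    rw [List.foldl_cons]
    have hlen : ((' ' :: c) ++ [ch]).length = c.length + 2 := by simp
    have hstep : stepA g p (res, grps, ' ' :: c) ch = (res, grps, ' ' :: (c ++ [ch])) := by
      simp only [stepA, List.cons_append]
      rw [if_neg (by rw [show (' ' :: (c ++ [ch])).length = c.length + 2 from by simp]; omega)]
    rw [hstep, ih (c ++ [ch])]
    simp

-- group size k+1: fewer than k+1-|c| chars left, they are simply accumulated
theorem foldA_tail (g p : Int) (k : Nat) (hg : g = (k : Int) + 1)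
    (t : List Char) (res : List Char) (grps : List (List Char)) (c : List Char)
    (h : c.length + t.length < k + 1) :
    t.foldl (stepA g p) (res, grps, ' ' :: c) = (res, grps, ' ' :: (c ++ t)) := by
  induction t generalizing c with
  | nil => simp
  | cons ch t' ih =>
    rw [List.foldl_cons]
    simp only [List.length_cons] at h
    have hstep : stepA g p (res, grps, ' ' :: c) ch = (res, grps, ' ' :: (c ++ [ch])) := by
      simp only [stepA, List.cons_append]
      rw [if_neg (by
        rw [show (' ' :: (c ++ [ch])).length = c.length + 2 from by simp, hg]; omega)]
    rw [hstep, ih (c ++ [ch]) (by simp; omega)]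
    simp

-- group size k+1: the next k+1-|c| chars complete one group
theorem foldA_one (g p : Int) (k : Nat) (hg : g = (k : Int) + 1)
    (t : List Char) (res : List Char) (grps : List (List Char)) (c : List Char)
    (hc : c.length < k + 1) (ht : k + 1 ≤ c.length + t.length) :
    t.foldl (stepA g p) (res, grps, ' ' :: c) =
      (t.drop (k + 1 - c.length)).foldl (stepA g p)
        ((cStep p (res, grps) (c ++ t.take (k + 1 - c.length))).1,
         (cStep p (res, grps) (c ++ t.take (k + 1 - c.length))).2, [' ']) := by
  induction t generalizing c with
  | nil => simp only [List.length_nil, Nat.add_zero] at ht; omega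
  | cons ch t' ih =>
    simp only [List.length_cons] at ht
    by_cases hck : c.length = k
    · -- this char completes the group
      have htk : k + 1 - c.length = 1 := by omega
      rw [htk]
      simp only [List.take_succ_cons, List.take_zero, List.drop_succ_cons, List.drop_zero,
        List.foldl_cons]
      have hstep : stepA g p (res, grps, ' ' :: c) ch =
          ((cStep p (res, grps) (c ++ [ch])).1, (cStep p (res, grps) (c ++ [ch])).2, [' ']) := by
        simp only [stepA, cStep, List.cons_append]
        rw [if_pos (by
          rw [show (' ' :: (c ++ [ch])).length = c.length + 2 from by simp, hg]; omega)]
        by_cases hp2 : ((grps.length : Nat) : Int) + 1 = p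
        · rw [if_pos (by rw [show (grps ++ [' ' :: (c ++ [ch])]).length = grps.length + 1 from by simp]; omega),
              if_pos hp2]
        · rw [if_neg (by rw [show (grps ++ [' ' :: (c ++ [ch])]).length = grps.length + 1 from by simp]; omega),
              if_neg hp2]
      rw [hstep]
    · -- the group is still short
      rw [List.foldl_cons]
      have hstep : stepA g p (res, grps, ' ' :: c) ch = (res, grps, ' ' :: (c ++ [ch])) := by
        simp only [stepA, List.cons_append]
        rw [if_neg (by
          rw [show (' ' :: (c ++ [ch])).length = c.length + 2 from by simp, hg]; omega)]
      rw [hstep, ih (c ++ [ch]) (by simp only [List.length_append, List.length_cons, List.length_nil]; omega)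
        (by simp only [List.length_append, List.length_cons, List.length_nil]; omega)]
      have harith : k + 1 - c.length = (k - c.length) + 1 := by omega
      have harith2 : k + 1 - (c ++ [ch]).length = k - c.length := by simp only [List.length_append, List.length_cons, List.length_nil]; omega
      rw [harith, harith2, List.take_succ_cons, List.drop_succ_cons]
      simp

-- the whole char loop, reduced to a fold over the full chunks
theorem foldA_chunks (g p : Int) (k : Nat) (hg : g = (k : Int) + 1)
    (t : List Char) (res : List Char) (grps : List (List Char)) :
    t.foldl (stepA g p) (res, grps, [' ']) =
      (((fullTake k t).foldl (cStep p) (res, grps)).1,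
       ((fullTake k t).foldl (cStep p) (res, grps)).2, ' ' :: partTake k t) := by
  induction t using fullTake.induct k generalizing res grps with
  | case1 t h =>
    rw [fullTake_small k t h, partTake_small k t h]
    have := foldA_tail g p k hg t res grps [] (by simpa using h)
    simpa using this
  | case2 t h ih =>
    have h1 := foldA_one g p k hg t res grps [] (by simp)
      (by simp only [List.length_nil, Nat.zero_add]; omega)
    simp only [List.nil_append, List.length_nil, Nat.sub_zero] at h1
    have hft : fullTake k t = t.take (k + 1) :: fullTake k (t.drop (k + 1)) := by
      rw [fullTake, if_neg h]
    have hpt : partTake k t = partTake k (t.drop (k + 1)) := by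
      rw [partTake, if_neg h]
    rw [h1, ih, hft, hpt, List.foldl_cons]

-- ---- chunk-level lemmas ----

-- non-positive groups_per_line: lines are never flushed
theorem foldC_nonpos (p : Int) (hp : p ≤ 0) (cs : List (List Char)) (res : List Char)
    (grps : List (List Char)) :
    cs.foldl (cStep p) (res, grps) = (res, grps ++ cs.map (fun c => ' ' :: c)) := by
  induction cs generalizing grps with
  | nil => simp
  | cons c cs' ih =>
    rw [List.foldl_cons]
    have hstep : cStep p (res, grps) c = (res, grps ++ [' ' :: c]) := by
      simp only [cStep]
      rw [if_neg (by omega)]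
    rw [hstep, ih (grps ++ [' ' :: c])]
    simp

-- positive groups_per_line m+1: the chunk fold emits one line per full batch
theorem foldC_pos (p : Int) (m : Nat) (hp : p = (m : Int) + 1)
    (cs : List (List Char)) (res : List Char) (gs : List (List Char)) (hgs : gs.length < m + 1) :
    cs.foldl (cStep p) (res, gs.map (fun c => ' ' :: c)) =
      (res ++ ((fullTake m (gs ++ cs)).map
          (fun b => '\n' :: PySem.Chars.strip (PySem.Chars.join [' '] b))).flatten,
        (partTake m (gs ++ cs)).map (fun c => ' ' :: c)) := by
  induction cs generalizing gs res with
  | nil =>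
    rw [List.append_nil, fullTake_small m gs hgs, partTake_small m gs hgs]
    simp
  | cons c cs' ih =>
    rw [List.foldl_cons]
    by_cases hgm : gs.length = m
    · -- this chunk completes the line: it is flushed
      have hstep : cStep p (res, gs.map (fun c => ' ' :: c)) c =
          (res ++ '\n' :: PySem.Chars.strip (PySem.Chars.join [' '] (gs ++ [c])),
           ([] : List (List Char))) := by
        simp only [cStep]
        rw [if_pos (by
          rw [show ((gs.map (fun c => ' ' :: c)).length : Nat) = gs.length from by simp]
          omega)]
        rw [show gs.map (fun c => ' ' :: c) ++ [' ' :: c] = (gs ++ [c]).map (fun c => ' ' :: c)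
          from by simp]
        rw [strip_join_sp (gs ++ [c])]
      rw [hstep]
      have hih := ih (res ++ '\n' :: PySem.Chars.strip (PySem.Chars.join [' '] (gs ++ [c])))
        [] (by simp)
      simp only [List.map_nil, List.nil_append] at hih
      rw [hih]
      have hb : (gs ++ [c]).length = m + 1 := by simp [hgm]
      rw [show gs ++ c :: cs' = (gs ++ [c]) ++ cs' from by simp,
          fullTake_block m _ _ hb, partTake_block m _ _ hb]
      simp
    · -- the line is still short
      have hstep : cStep p (res, gs.map (fun c => ' ' :: c)) c =
          (res, (gs ++ [c]).map (fun c => ' ' :: c)) := by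
        simp only [cStep]
        rw [if_neg (by
          rw [show ((gs.map (fun c => ' ' :: c)).length : Nat) = gs.length from by simp]
          omega)]
        simp
      rw [hstep, ih res (gs ++ [c]) (by simp; omega)]
      rw [show gs ++ c :: cs' = (gs ++ [c]) ++ cs' from by simp]

theorem chunkBy_singleton {α : Type} (k : Nat) (x : α) : chunkBy k [x] = [[x]] := by
  rw [chunkBy, List.take_of_length_le (by simp), List.drop_of_length_le (by simp), chunkBy]

theorem strip_nil : PySem.Chars.strip [] = [] := rfl

-- assembling the final result: A's optional last line matches the line list with a last element
theorem final_assembly (Ls : List (List Char)) (L : List Char) :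
    PySem.Chars.strip (if L ≠ [] then (Ls.map (fun l => '\n' :: l)).flatten ++ '\n' :: L
                       else (Ls.map (fun l => '\n' :: l)).flatten) =
      PySem.Chars.strip (PySem.Chars.join ['\n'] (Ls ++ [L])) := by
  by_cases hLe : L = []
  · rw [if_neg (by simp [hLe]), hLe, strip_join_append_nil '\n' rfl Ls, strip_flatten_nl]
  · rw [if_pos (by simp [hLe])]
    rw [show (Ls.map (fun l => '\n' :: l)).flatten ++ '\n' :: L
        = ((Ls ++ [L]).map (fun l => '\n' :: l)).flatten from by simp]
    exact strip_flatten_nl (Ls ++ [L])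

-- ===== VERDICT (by name: the statement is the Claim_ definition above) =====
theorem group_text_spec : Claim_equal_group_text := by
  intro text u g p _
  unfold Spec_group_text
  show group_text text u g p = group_text_alt text u g p
  simp only [group_text, group_text_alt]
  have hfold : List.foldl (grpStepA u g p) ([], [], [' ']) text.toList =
      List.foldl (stepA g p) ([], [], [' '])
        (text.toList.map (fun ch => if u then PySem.Chars.upperChar ch else PySem.Chars.lowerChar ch)) := by
    rw [grpStepA_eq u g p, List.foldl_map]
  have hcase : (if u then PySem.Chars.upper text.toList else PySem.Chars.lower text.toList) =
      text.toList.map (fun ch => if u then PySem.Chars.upperChar ch else PySem.Chars.lowerChar ch) := by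
    cases u <;> rfl
  rw [hfold, hcase]
  generalize (text.toList.map
    (fun ch => if u then PySem.Chars.upperChar ch else PySem.Chars.lowerChar ch)) = t
  apply congrArg String.ofList
  by_cases hg0 : g ≤ 0
  · -- group_size ≤ 0 : the whole text stays one group
    rw [if_pos hg0]
    rw [foldA_nonpos g p hg0 t [] [] []]
    have hbat : (if p ≤ 0 then [[t]] else chunkBy (p.toNat - 1) [t]) = [[t]] := by
      by_cases hp0 : p ≤ 0
      · rw [if_pos hp0]
      · rw [if_neg hp0, chunkBy_singleton]
    rw [hbat]
    simp only [List.map_cons, List.map_nil, List.nil_append]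
    rw [PySem.Chars.join_nil, PySem.Chars.join_singleton, PySem.Chars.join_singleton]
    rw [strip_strip]
    simp only [List.nil_append]
    rw [strip_cons_space ' ' rfl]
    by_cases hl : PySem.Chars.strip t = []
    · rw [if_neg (by simpa using hl), strip_nil, hl]
    · rw [if_pos (by simpa using hl)]
      rw [strip_cons_space '\n' rfl, strip_strip]
  · -- 0 < group_size = k + 1
    have hk : g = ((g.toNat - 1 : Nat) : Int) + 1 := by omega
    rw [if_neg hg0]
    rw [foldA_chunks g p (g.toNat - 1) hk t [] []]
    by_cases hp0 : p ≤ 0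
    · -- groups_per_line ≤ 0 : a single line
      rw [if_pos hp0]
      rw [foldC_nonpos p hp0 (fullTake (g.toNat - 1) t) [] []]
      simp only [List.nil_append, List.map_cons, List.map_nil]
      rw [lastline_eq (fullTake (g.toNat - 1) t) (partTake (g.toNat - 1) t)]
      rw [PySem.Chars.join_singleton, strip_strip]
      have hBL : PySem.Chars.strip (PySem.Chars.join [' '] (chunkBy (g.toNat - 1) t)) =
          PySem.Chars.strip (PySem.Chars.join [' ']
            (fullTake (g.toNat - 1) t ++ [partTake (g.toNat - 1) t])) := by
        rw [chunkBy_eq_fullTake_partTake (g.toNat - 1) t]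
        by_cases hPCe : partTake (g.toNat - 1) t = []
        · rw [if_pos hPCe, hPCe, List.append_nil]
          exact (strip_join_append_nil ' ' rfl (fullTake (g.toNat - 1) t)).symm
        · rw [if_neg hPCe]
      rw [hBL]
      by_cases hL : PySem.Chars.strip (PySem.Chars.join [' ']
          (fullTake (g.toNat - 1) t ++ [partTake (g.toNat - 1) t])) = []
      · rw [if_neg (by simpa using hL), strip_nil, hL]
      · rw [if_pos (by simpa using hL)]
        rw [strip_cons_space '\n' rfl, strip_strip]
    · -- groups_per_line = m + 1 > 0
      have hm : p = ((p.toNat - 1 : Nat) : Int) + 1 := by omega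
      rw [if_neg hp0]
      have hq := foldC_pos p (p.toNat - 1) hm (fullTake (g.toNat - 1) t) [] [] (by simp)
      simp only [List.map_nil, List.nil_append] at hq
      rw [hq]
      rw [lastline_eq (partTake (p.toNat - 1) (fullTake (g.toNat - 1) t))
          (partTake (g.toNat - 1) t)]
      rw [show (fullTake (p.toNat - 1) (fullTake (g.toNat - 1) t)).map
            (fun b => '\n' :: PySem.Chars.strip (PySem.Chars.join [' '] b)) =
          ((fullTake (p.toNat - 1) (fullTake (g.toNat - 1) t)).map
            (fun b => PySem.Chars.strip (PySem.Chars.join [' '] b))).map (fun l => '\n' :: l)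
        from by rw [List.map_map]; rfl]
      rw [final_assembly]
      -- both sides are stripped '\n'-joins; compare the line lists
      by_cases hPCe : partTake (g.toNat - 1) t = []
      · -- no partial chunk
        have hc1 : chunkBy (g.toNat - 1) t = fullTake (g.toNat - 1) t := by
          rw [chunkBy_eq_fullTake_partTake (g.toNat - 1) t, if_pos hPCe, List.append_nil]
        rw [hc1, chunkBy_eq_fullTake_partTake (p.toNat - 1) (fullTake (g.toNat - 1) t)]
        have hL' : PySem.Chars.strip (PySem.Chars.join [' ']
              (partTake (p.toNat - 1) (fullTake (g.toNat - 1) t) ++ [partTake (g.toNat - 1) t])) =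
            PySem.Chars.strip (PySem.Chars.join [' ']
              (partTake (p.toNat - 1) (fullTake (g.toNat - 1) t))) := by
          rw [hPCe]
          exact strip_join_append_nil ' ' rfl _
        by_cases hPe : partTake (p.toNat - 1) (fullTake (g.toNat - 1) t) = []
        · rw [if_pos hPe, List.append_nil]
          rw [hL', hPe, PySem.Chars.join_nil, strip_nil]
          exact strip_join_append_nil '\n' rfl _
        · rw [if_neg hPe, hL']
          rw [List.map_append]
          simp only [List.map_cons, List.map_nil]
      · -- the partial chunk is a final short group
        have hc1 : chunkBy (g.toNat - 1) t =
            fullTake (g.toNat - 1) t ++ [partTake (g.toNat - 1) t] := by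
          rw [chunkBy_eq_fullTake_partTake (g.toNat - 1) t, if_neg hPCe]
        rw [hc1]
        have hPlen := length_partTake (p.toNat - 1) (fullTake (g.toNat - 1) t)
        by_cases hPm : (partTake (p.toNat - 1) (fullTake (g.toNat - 1) t)).length = p.toNat - 1
        · -- the partial chunk completes a batch
          obtain ⟨hf1, hf2⟩ := fullTake_append_full (p.toNat - 1) (fullTake (g.toNat - 1) t)
            [partTake (g.toNat - 1) t] (by simp [hPm])
          rw [chunkBy_eq_fullTake_partTake (p.toNat - 1)
              (fullTake (g.toNat - 1) t ++ [partTake (g.toNat - 1) t]), hf1, hf2,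
              if_pos rfl, List.append_nil]
          rw [List.map_append]
          simp only [List.map_cons, List.map_nil]
        · -- the partial chunk joins the last short batch
          obtain ⟨hf1, hf2⟩ := fullTake_append_small (p.toNat - 1) (fullTake (g.toNat - 1) t)
            [partTake (g.toNat - 1) t]
            (by simp only [List.length_cons, List.length_nil]; omega)
          rw [chunkBy_eq_fullTake_partTake (p.toNat - 1)
              (fullTake (g.toNat - 1) t ++ [partTake (g.toNat - 1) t]), hf1, hf2,
              if_neg (by simp)]
          rw [List.map_append]
          simp only [List.map_cons, List.map_nil]
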